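-- pv_equiv track=rewrite | github.com/mohamedAlaa26/RecommendationSystem | recommendation.py | freq_list_cart
-- ===== SOURCE A (Python) =====
-- def freq_list_cart(user, cart, all_users_stats):
--     user_stats = all_users_stats.get(user, {})
--     freq = {}
--     for cart_item in cart:
--         for item, related_items in user_stats.items():
--             if cart_item in related_items and item not in cart:
--                 if item in freq:
--                     freq[item] += 1
--                 else:
--                     freq[item] = 1
--     return freq
-- ===== SOURCE B (Python) =====
-- def freq_list_cart(user, cart, all_users_stats):
--     user_stats = all_users_stats.get(user, {})
--     # inverted index: related value -> list of items (cart items excluded up front)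
--     index = {}
--     for item, related_items in user_stats.items():
--         if item in cart:
--             continue
--         for val in set(related_items):
--             index.setdefault(val, []).append(item)
--     freq = {}
--     for cart_item in cart:
--         for item in index.get(cart_item, []):
--             freq[item] = freq.get(item, 0) + 1
--     return freq
-- ===== Notes on version B (the rewrite author's own statement) =====
-- stated objective: alternative
-- what changed: Replaces the per-cart-item rescan of all user_stats entries with an inverted index (related value -> items, cart items excluded) built once, then tallies by direct index lookup per cart item.
import Mathlib
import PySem

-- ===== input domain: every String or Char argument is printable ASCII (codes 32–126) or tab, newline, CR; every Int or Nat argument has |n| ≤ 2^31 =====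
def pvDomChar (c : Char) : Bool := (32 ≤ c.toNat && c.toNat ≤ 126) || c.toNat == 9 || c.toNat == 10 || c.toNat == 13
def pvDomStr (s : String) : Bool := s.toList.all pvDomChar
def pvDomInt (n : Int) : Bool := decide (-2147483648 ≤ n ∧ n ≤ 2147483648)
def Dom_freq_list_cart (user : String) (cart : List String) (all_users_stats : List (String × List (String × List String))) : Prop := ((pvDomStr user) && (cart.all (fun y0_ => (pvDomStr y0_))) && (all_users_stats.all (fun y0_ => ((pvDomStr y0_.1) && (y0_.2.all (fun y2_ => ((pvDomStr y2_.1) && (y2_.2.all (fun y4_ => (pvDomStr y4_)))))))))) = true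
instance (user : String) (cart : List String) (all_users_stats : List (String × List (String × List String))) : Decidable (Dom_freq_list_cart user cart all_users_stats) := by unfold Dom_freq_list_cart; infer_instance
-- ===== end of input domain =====

-- B replaces A's per-cart-item rescan of user_stats with an inverted index (related value → items)
-- built once, then tallies by direct lookup per cart item (objective: alternative algorithm).

-- ===== PORT A =====
def freq_list_cart (user : String) (cart : List String) (all_users_stats : List (String × List (String × List String))) : List (String × Int) :=
  let user_stats := (PySem.Dict.mk all_users_stats).getD user []
  let freq : PySem.Dict String Int :=
    cart.foldl (fun freq cart_item =>
      user_stats.foldl (fun freq p =>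
        if p.2.contains cart_item && !(cart.contains p.1) then
          if freq.contains p.1 then
            freq.modify p.1 0 (· + 1)   -- freq[item] += 1 (key present, so dflt 0 is never used)
          else
            freq.insert p.1 1
        else freq) freq) PySem.Dict.empty
  freq.items

-- ===== PORT B =====
def freq_list_cart_alt (user : String) (cart : List String) (all_users_stats : List (String × List (String × List String))) : List (String × Int) :=
  let user_stats := (PySem.Dict.mk all_users_stats).getD user []
  let index : PySem.Dict String (List String) :=
    user_stats.foldl (fun idx p =>
      if cart.contains p.1 then idx
      else (PySem.Set.ofList p.2).foldl (fun idx v =>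
        idx.modify v [] (· ++ [p.1])) idx)   -- index.setdefault(val, []).append(item)
      PySem.Dict.empty
  let freq : PySem.Dict String Int :=
    cart.foldl (fun freq cart_item =>
      (index.getD cart_item []).foldl (fun freq item =>
        freq.insert item (freq.getD item 0 + 1)) freq)   -- freq[item] = freq.get(item, 0) + 1
      PySem.Dict.empty
  freq.items

-- ===== PRECONDITION & SPEC =====
def Spec_freq_list_cart (user : String) (cart : List String) (all_users_stats : List (String × List (String × List String))) (out : List (String × Int)) : Prop := out = freq_list_cart_alt user cart all_users_stats
instance (user : String) (cart : List String) (all_users_stats : List (String × List (String × List String))) (out : List (String × Int)) : Decidable (Spec_freq_list_cart user cart all_users_stats out) := by unfold Spec_freq_list_cart; infer_instance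

-- ===== CLAIM (what is proved, stated in full; the proofs are below) =====
def Claim_equal_freq_list_cart : Prop := ∀ (user : String) (cart : List String) (all_users_stats : List (String × List (String × List String))), Dom_freq_list_cart user cart all_users_stats → Spec_freq_list_cart user cart all_users_stats (freq_list_cart user cart all_users_stats)

-- ===== LEMMAS AND PROOFS =====

-- A's "if item in freq: freq[item] += 1 else: freq[item] = 1" is one counter-insert.
lemma stepA_eq (f : PySem.Dict String Int) (i : String) :
    (if f.contains i then f.modify i 0 (· + 1) else f.insert i 1) = f.insert i (f.getD i 0 + 1) := by
  by_cases h : f.contains i = true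
  · simp [h, PySem.Dict.modify]
  · have h' : f.contains i = false := by simpa using h
    rw [if_neg (by simp [h']), PySem.Dict.getD_of_not_contains f 0 h']
    norm_num

-- one bucket-filling pass for a single item over its deduplicated related values
lemma bucket_one (vs : List String) (a : String) (idx : PySem.Dict String (List String))
    (ci : String) (h : vs.Nodup) :
    (vs.foldl (fun idx v => idx.modify v [] (· ++ [a])) idx).getD ci []
      = idx.getD ci [] ++ (if ci ∈ vs then [a] else []) := by
  have hmap : vs.foldl (fun idx v => idx.modify v [] (· ++ [a])) idx
      = (vs.map (fun v => (v, a))).foldl (fun d q => d.modify q.1 [] (· ++ [q.2])) idx := by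
    rw [List.foldl_map]
  rw [hmap, PySem.Dict.getD_foldl_modify_append]
  congr 1
  rw [List.filter_map]
  simp only [List.map_map, Function.comp_def]
  rw [show (fun v : String => (v, a).1 == ci) = (fun v : String => v == ci) from rfl,
    List.filter_beq, List.Nodup.count h]
  by_cases hm : ci ∈ vs <;> simp [hm]

-- the value of one bucket of B's inverted index
lemma bucket (cart : List String) (us : List (String × List String))
    (idx : PySem.Dict String (List String)) (ci : String) :
    (us.foldl (fun idx p =>
        if cart.contains p.1 then idx
        else (PySem.Set.ofList p.2).foldl (fun idx v => idx.modify v [] (· ++ [p.1])) idx)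
      idx).getD ci []
      = idx.getD ci []
        ++ (us.filter (fun p => p.2.contains ci && !(cart.contains p.1))).map Prod.fst := by
  induction us generalizing idx with
  | nil => simp
  | cons p rest ih =>
    simp only [List.foldl_cons, List.filter_cons]
    by_cases hc : p.1 ∈ cart
    · rw [if_pos (by simp [hc]), ih]
      simp [hc]
    · rw [if_neg (by simp [hc]), ih,
        bucket_one (PySem.Set.ofList p.2) p.1 idx ci (PySem.Set.nodup_ofList p.2)]
      by_cases hm : ci ∈ p.2
      · have hs : ci ∈ PySem.Set.ofList p.2 := (PySem.Set.mem_ofList _ _).mpr hm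
        simp [hs, hm, hc, List.append_assoc]
      · have hs : ci ∉ PySem.Set.ofList p.2 := fun h => hm ((PySem.Set.mem_ofList _ _).mp h)
        simp [hs, hm, hc]

-- per cart item, A's inner scan equals B's bucket fold
lemma inner_eq (cart : List String) (us : List (String × List String)) (ci : String)
    (f0 : PySem.Dict String Int) :
    us.foldl (fun f p =>
        if p.2.contains ci && !(cart.contains p.1) then
          if f.contains p.1 then f.modify p.1 0 (· + 1) else f.insert p.1 1
        else f) f0
      = ((us.foldl (fun idx p =>
            if cart.contains p.1 then idx
            else (PySem.Set.ofList p.2).foldl (fun idx v => idx.modify v [] (· ++ [p.1])) idx)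
          (PySem.Dict.empty : PySem.Dict String (List String))).getD ci []).foldl
          (fun f i => f.insert i (f.getD i 0 + 1)) f0 := by
  rw [bucket, PySem.Dict.getD_empty, List.nil_append, List.foldl_map,
    PySem.List.foldl_congr_mem _ _
      (fun f p => if p.2.contains ci && !(cart.contains p.1)
        then f.insert p.1 (f.getD p.1 0 + 1) else f) f0
      (fun acc x _ => by rw [stepA_eq]),
    PySem.List.foldl_if_eq_foldl_filter]

-- ===== VERDICT (by name: the statement is the Claim_ definition above) =====
theorem freq_list_cart_spec : Claim_equal_freq_list_cart := by
  intro user cart all_users_stats _dom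
  show _ = _
  simp only [freq_list_cart, freq_list_cart_alt]
  congr 1
  exact PySem.List.foldl_congr_mem _ _ _ _
    (fun acc ci _ => inner_eq cart ((PySem.Dict.mk all_users_stats).getD user []) ci acc)
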